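-- pv_equiv track=rewrite | github.com/HirokiIshiguro/rx72n-envision-kit | test_scripts/uart_test/test_aws_demos_commands.py | extract_response_body
-- ===== SOURCE A (Python) =====
-- def extract_response_body(raw_response, cmd):
--     """応答からエコーバックとプロンプトを除去し、本体部分を抽出する
--
--     Args:
--         raw_response: 生の応答文字列
--         cmd: 送信したコマンド
--
--     Returns:
--         str: 応答本体
--     """
--     if raw_response is None:
--         return ""
--     lines = raw_response.replace("\r", "").split("\n")
--     body_lines = []
--     skip_echo = True
--     for line in lines:
--         stripped = line.strip()
--         # エコーバック行をスキップ（コマンド文字列を含む行）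
--         if skip_echo and cmd in stripped:
--             skip_echo = False
--             continue
--         # プロンプト行をスキップ
--         if stripped == "$" or stripped == "RX72N Envision Kit":
--             continue
--         if stripped:
--             body_lines.append(stripped)
--     return "\n".join(body_lines)
-- ===== SOURCE B (Python) =====
-- def extract_response_body(raw_response, cmd):
--     """Two-pass version: locate the echo line first, then filter prompt/empty lines."""
--     if raw_response is None:
--         return ""
--     lines = raw_response.replace("\r", "").split("\n")
--     echo_idx = next((i for i, line in enumerate(lines) if cmd in line.strip()), None)
--     kept = lines if echo_idx is None else lines[:echo_idx] + lines[echo_idx + 1:]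
--     body = [s for s in (line.strip() for line in kept)
--             if s and s != "$" and s != "RX72N Envision Kit"]
--     return "\n".join(body)
-- ===== Notes on version B (the rewrite author's own statement) =====
-- stated objective: simpler
-- what changed: Replaces the stateful skip_echo flag loop by two separated passes: first find the index of the echo line, then a plain filter over the remaining lines.
import Mathlib
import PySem

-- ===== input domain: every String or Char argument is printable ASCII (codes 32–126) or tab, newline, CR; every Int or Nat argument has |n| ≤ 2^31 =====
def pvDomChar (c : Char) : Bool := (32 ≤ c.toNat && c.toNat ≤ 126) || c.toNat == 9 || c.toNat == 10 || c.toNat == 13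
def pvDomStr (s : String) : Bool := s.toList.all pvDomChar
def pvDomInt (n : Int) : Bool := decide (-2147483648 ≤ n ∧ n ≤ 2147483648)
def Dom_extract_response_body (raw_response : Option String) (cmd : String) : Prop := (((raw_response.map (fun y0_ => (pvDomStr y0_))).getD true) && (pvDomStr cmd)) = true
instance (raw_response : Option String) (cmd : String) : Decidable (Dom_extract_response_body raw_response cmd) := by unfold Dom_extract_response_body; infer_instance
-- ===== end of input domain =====

-- B restructures A's single stateful loop (skip_echo flag) into two separate passes:
-- find the echo line's index first, then filter prompt/empty lines; objective: simpler.

-- ===== PORT A =====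
-- A's loop step; state = (body_lines, skip_echo)
def pvStepA (cmd : String) (st : List String × Bool) (line : String) : List String × Bool :=
  let stripped := PySem.Str.strip line
  if st.2 && PySem.Str.isIn cmd stripped then (st.1, false)
  else if stripped == "$" || stripped == "RX72N Envision Kit" then st
  else if stripped != "" then (st.1 ++ [stripped], st.2)
  else st

def extract_response_body (raw_response : Option String) (cmd : String) : String :=
  match raw_response with
  | none => ""
  | some r =>
    -- split? with the literal separator "\n" is always `some` (sep ≠ "")
    let lines := (PySem.Str.split? (PySem.Str.replace r "\r" "") "\n").getD []
    let res := lines.foldl (pvStepA cmd) ([], true)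
    PySem.Str.join "\n" res.1

-- ===== PORT B =====
def extract_response_body_alt (raw_response : Option String) (cmd : String) : String :=
  match raw_response with
  | none => ""
  | some r =>
    let lines := (PySem.Str.split? (PySem.Str.replace r "\r" "") "\n").getD []
    -- pass 1: index of the echo line (next((i for i, line in enumerate(lines) if ...), None))
    let echoIdx? := lines.findIdx? (fun line => PySem.Str.isIn cmd (PySem.Str.strip line))
    -- lines[:i] + lines[i+1:]
    let kept :=
      match echoIdx? with
      | none => lines
      | some i => PySem.List.slice lines none (some (i : Int)) ++
                  PySem.List.slice lines (some ((i : Int) + 1)) none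
    -- pass 2: plain filter
    let body := (kept.map PySem.Str.strip).filter
      (fun s => s != "" && s != "$" && s != "RX72N Envision Kit")
    PySem.Str.join "\n" body

-- ===== PRECONDITION & SPEC =====
def Spec_extract_response_body (raw_response : Option String) (cmd : String) (out : String) : Prop := out = extract_response_body_alt raw_response cmd
instance (raw_response : Option String) (cmd : String) (out : String) : Decidable (Spec_extract_response_body raw_response cmd out) := by unfold Spec_extract_response_body; infer_instance

-- ===== CLAIM (what is proved, stated in full; the proofs are below) =====
def Claim_equal_extract_response_body : Prop := ∀ (raw_response : Option String) (cmd : String), Dom_extract_response_body raw_response cmd → Spec_extract_response_body raw_response cmd (extract_response_body raw_response cmd)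

-- ===== LEMMAS AND PROOFS =====

def pvKeep (s : String) : Bool := s != "" && s != "$" && s != "RX72N Envision Kit"

def pvF (ls : List String) : List String := (ls.map PySem.Str.strip).filter pvKeep

theorem pvF_cons (l : String) (ls : List String) :
    pvF (l :: ls) = (if pvKeep (PySem.Str.strip l) then [PySem.Str.strip l] else []) ++ pvF ls := by
  simp only [pvF, List.map_cons, List.filter_cons]
  split <;> simp

theorem pvSlicePair (ls : List String) (i : Nat) :
    PySem.List.slice ls none (some (i : Int)) ++ PySem.List.slice ls (some ((i : Int) + 1)) none
      = ls.take i ++ ls.drop (i + 1) := by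
  have h : ((i : Int) + 1) = ((i + 1 : Nat) : Int) := by push_cast; ring
  rw [PySem.List.slice_to_natCast, h, PySem.List.slice_from_natCast]

-- B's body computation, as a function of the line list
def pvBodyB (cmd : String) (ls : List String) : List String :=
  match ls.findIdx? (fun line => PySem.Str.isIn cmd (PySem.Str.strip line)) with
  | none => pvF ls
  | some i => pvF (PySem.List.slice ls none (some (i : Int)) ++
                   PySem.List.slice ls (some ((i : Int) + 1)) none)

-- A's loop with skip_echo already False is a plain filter
theorem pvFoldA_false (cmd : String) (ls : List String) (acc : List String) :
    ls.foldl (pvStepA cmd) (acc, false) = (acc ++ pvF ls, false) := by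
  induction ls generalizing acc with
  | nil => simp [pvF]
  | cons l t ih =>
    have hstep : pvStepA cmd (acc, false) l =
        (acc ++ (if pvKeep (PySem.Str.strip l) then [PySem.Str.strip l] else []), false) := by
      simp only [pvStepA, pvKeep, Bool.false_and]
      split_ifs with h1 h2 <;> simp_all
    rw [List.foldl_cons, hstep, ih, pvF_cons, List.append_assoc]

-- A's loop with skip_echo still True computes B's body
theorem pvFoldA_true (cmd : String) (ls : List String) (acc : List String) :
    (ls.foldl (pvStepA cmd) (acc, true)).1 = acc ++ pvBodyB cmd ls := by
  induction ls generalizing acc with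
  | nil => simp [pvBodyB, pvF]
  | cons l t ih =>
    by_cases hp : PySem.Str.isIn cmd (PySem.Str.strip l) = true
    · have hstep : pvStepA cmd (acc, true) l = (acc, false) := by
        simp only [pvStepA, Bool.true_and]
        rw [hp]; simp
      have hbody : pvBodyB cmd (l :: t) = pvF t := by
        rw [pvBodyB, List.findIdx?_cons, hp]
        simp only [if_true]
        rw [pvSlicePair]
        simp
      rw [List.foldl_cons, hstep, pvFoldA_false, hbody]
    · rw [Bool.not_eq_true] at hp
      have hstep : pvStepA cmd (acc, true) l =
          (acc ++ (if pvKeep (PySem.Str.strip l) then [PySem.Str.strip l] else []), true) := by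
        simp only [pvStepA, pvKeep, Bool.true_and]
        rw [hp]
        simp only [Bool.false_eq_true, if_false]
        split_ifs with h1 h2 <;> simp_all
      have hbody : pvBodyB cmd (l :: t)
          = (if pvKeep (PySem.Str.strip l) then [PySem.Str.strip l] else []) ++ pvBodyB cmd t := by
        rw [pvBodyB, pvBodyB, List.findIdx?_cons, hp]
        simp only [Bool.false_eq_true, if_false]
        cases hfi : t.findIdx? (fun line => PySem.Str.isIn cmd (PySem.Str.strip line)) with
        | none => simp [pvF_cons]
        | some i =>
          simp only [Option.map_some]
          rw [pvSlicePair, pvSlicePair]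
          have htake : (l :: t).take (i + 1) = l :: t.take i := by simp
          have hdrop : (l :: t).drop (i + 1 + 1) = t.drop (i + 1) := by simp
          rw [htake, hdrop]
          rw [show (l :: t.take i) ++ t.drop (i + 1) = l :: (t.take i ++ t.drop (i + 1)) from rfl]
          rw [pvF_cons]
      rw [List.foldl_cons, hstep, ih, hbody, List.append_assoc]

-- ===== VERDICT (by name: the statement is the Claim_ definition above) =====
theorem extract_response_body_spec : Claim_equal_extract_response_body := by
  intro raw_response cmd _
  unfold Spec_extract_response_body extract_response_body extract_response_body_alt
  cases raw_response with
  | none => rfl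
  | some r =>
    simp only
    generalize (PySem.Str.split? (PySem.Str.replace r "\r" "") "\n").getD [] = lines
    rw [pvFoldA_true]
    cases hfi : List.findIdx? (fun line => PySem.Str.isIn cmd (PySem.Str.strip line)) lines <;>
      simp only [List.nil_append, pvBodyB, hfi, pvF] <;> rfl
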